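-- pv_equiv track=rewrite | github.com/Algorithm-Study/Algorithm | implementation/B5577_이성우.py | check
-- ===== SOURCE A (Python) =====
-- def check(arr):
--     if len(arr) < 4:
--         return arr
--     start = 0
--     cnt = 0
--     for i in range(len(arr)):
--         if arr[start] == arr[i]:
--             cnt += 1
--         else:
--             if cnt >= 4:
--                 arr = arr[:start] + arr[start + cnt:]
--                 arr = check(arr)
--                 return arr
--             else:
--                 start = i
--                 cnt = 1
--     else:
--         if cnt >= 4:
--                 arr = arr[:start] + arr[start + cnt:]
--                 arr = check(arr)
--     return arr
-- ===== SOURCE B (Python) =====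
-- def check(arr):
--     # single pass with a (value, count) stack; pop a run when it has >= 4
--     # elements and the next element differs, merging across the removed run
--     stack = []  # list of [value, count]; non-top counts are always < 4
--     for x in arr:
--         if stack and stack[-1][0] == x:
--             stack[-1][1] += 1
--         else:
--             if stack and stack[-1][1] >= 4:
--                 stack.pop()
--                 if stack and stack[-1][0] == x:
--                     stack[-1][1] += 1
--                     continue
--             stack.append([x, 1])
--     if stack and stack[-1][1] >= 4:
--         stack.pop()
--     out = []
--     for v, c in stack:
--         out.extend([v] * c)
--     return out
-- ===== Notes on version B (the rewrite author's own statement) =====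
-- stated objective: alternative
-- what changed: Replaced A's repeated rescan-from-the-start-and-remove recursion (slicing and rescanning the whole list after each removed run) by a single left-to-right pass maintaining a (value, count) stack that pops a finished run of >= 4 and merges the neighbours across it; same measured cost on random inputs, which contain few removable runs.
import Mathlib
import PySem

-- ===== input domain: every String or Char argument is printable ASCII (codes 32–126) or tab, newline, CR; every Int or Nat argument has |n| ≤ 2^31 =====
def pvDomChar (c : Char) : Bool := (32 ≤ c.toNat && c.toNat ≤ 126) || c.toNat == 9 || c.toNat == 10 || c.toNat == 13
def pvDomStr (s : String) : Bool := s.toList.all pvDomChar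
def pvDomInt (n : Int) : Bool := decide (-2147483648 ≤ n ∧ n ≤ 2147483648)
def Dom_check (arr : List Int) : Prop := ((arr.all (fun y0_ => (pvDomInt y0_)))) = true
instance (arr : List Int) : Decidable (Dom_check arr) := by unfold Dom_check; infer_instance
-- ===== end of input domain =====

-- B replaces A's repeated rescan-and-remove recursion by a single pass with a
-- (value, count) stack, popping a run when it has ≥ 4 elements (objective: alternative).

-- ===== PORT A =====
-- the 'for i in range(len(arr))' loop of A: returns .inl (start, cnt) on the
-- early 'cnt >= 4' removal branch, .inr (start, cnt) when the loop completes
def loopA (arr : List Int) (i start cnt : Nat) : (Nat × Nat) ⊕ (Nat × Nat) :=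
  if h : i < arr.length then
    if arr.getD start 0 == arr.getD i 0 then
      loopA arr (i+1) start (cnt+1)
    else if 4 ≤ cnt then
      Sum.inl (start, cnt)
    else
      loopA arr (i+1) i 1
  else
    Sum.inr (start, cnt)
termination_by arr.length - i

-- A's recursion, made total with fuel (each recursive call removes ≥ 4 elements,
-- so fuel arr.length + 1 is always enough; proved in the lemmas below)
def checkFuel : Nat → List Int → List Int
  | 0, arr => arr
  | f+1, arr =>
    if arr.length < 4 then arr
    else
      match loopA arr 0 0 0 with
      | Sum.inl (start, cnt) => checkFuel f (arr.take start ++ arr.drop (start + cnt))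
      | Sum.inr (start, cnt) =>
        if 4 ≤ cnt then checkFuel f (arr.take start ++ arr.drop (start + cnt)) else arr

def check (arr : List Int) : List Int := checkFuel (arr.length + 1) arr

-- ===== PORT B =====
-- push one element onto the (value, count) stack (head = top), popping a
-- finished run of ≥ 4 and merging with the element below it
def push (s : List (Int × Nat)) (x : Int) : List (Int × Nat) :=
  match s with
  | [] => [(x, 1)]
  | (v, c) :: t =>
    if v == x then (v, c+1) :: t
    else if 4 ≤ c then
      match t with
      | [] => [(x, 1)]
      | (v2, c2) :: t2 => if v2 == x then (v2, c2+1) :: t2 else (x, 1) :: (v2, c2) :: t2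
    else (x, 1) :: (v, c) :: t

-- final 'if stack and stack[-1][1] >= 4: stack.pop()'
def popTop (s : List (Int × Nat)) : List (Int × Nat) :=
  match s with
  | [] => []
  | (v, c) :: t => if 4 ≤ c then t else (v, c) :: t

-- the output loop: expand (value, count) pairs back to a list
def expandS (s : List (Int × Nat)) : List Int :=
  s.flatMap (fun e => List.replicate e.2 e.1)

def check_alt (arr : List Int) : List Int :=
  expandS (popTop (arr.foldl push [])).reverse

-- ===== PRECONDITION & SPEC =====
def Spec_check (arr : List Int) (out : List Int) : Prop := out = check_alt arr
instance (arr : List Int) (out : List Int) : Decidable (Spec_check arr out) := by unfold Spec_check; infer_instance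

-- ===== CLAIM (what is proved, stated in full; the proofs are below) =====
def Claim_equal_check : Prop := ∀ (arr : List Int), Dom_check arr → Spec_check arr (check arr)

-- ===== LEMMAS AND PROOFS =====

-- run-length encoding of a list, used only by the proofs
def rle : List Int → List (Int × Nat)
  | [] => []
  | x :: xs =>
    match rle xs with
    | [] => [(x, 1)]
    | (v, c) :: t => if x = v then (v, c+1) :: t else (x, 1) :: (v, c) :: t

-- first entry with count ≥ 4, with the prefix before it
def split4 : List (Int × Nat) → Option (List (Int × Nat) × Int × Nat × List (Int × Nat))
  | [] => none
  | (v, c) :: t =>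
    if 4 ≤ c then some ([], v, c, t)
    else
      match split4 t with
      | none => none
      | some (q, v', c', t') => some ((v, c) :: q, v', c', t')

theorem expandS_cons (v : Int) (c : Nat) (t : List (Int × Nat)) :
    expandS ((v, c) :: t) = List.replicate c v ++ expandS t := by
  simp [expandS]

theorem expandS_append (a b : List (Int × Nat)) :
    expandS (a ++ b) = expandS a ++ expandS b := by
  simp [expandS]

theorem rle_expand (l : List Int) : expandS (rle l) = l := by
  induction l with
  | nil => simp [rle, expandS]
  | cons x xs ih =>
    rw [rle]
    rcases h : rle xs with _ | ⟨⟨v, c⟩, t⟩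
    · rw [h] at ih; simp [expandS] at ih; simp [expandS, ih]
    · rw [h] at ih
      by_cases hx : x = v
      · simp only [if_pos hx, expandS_cons, List.replicate_succ] at *
        simp [hx, ih]
      · simp only [if_neg hx, expandS_cons, List.replicate] at *
        simp [ih]

theorem rle_pos (l : List Int) : ∀ e ∈ rle l, 1 ≤ e.2 := by
  induction l with
  | nil => simp [rle]
  | cons x xs ih =>
    rw [rle]
    rcases h : rle xs with _ | ⟨⟨v, c⟩, t⟩
    · simp
    · rw [h] at ih
      by_cases hx : x = v
      · simp only [if_pos hx]
        intro e he
        rcases List.mem_cons.1 he with rfl | ht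
        · omega
        · exact ih _ (List.mem_cons_of_mem _ ht)
      · simp only [if_neg hx]
        intro e he
        rcases List.mem_cons.1 he with rfl | ht
        · omega
        · exact ih _ ht

theorem rle_chain (l : List Int) : (rle l).IsChain (fun a b => a.1 ≠ b.1) := by
  induction l with
  | nil => rw [rle]; exact List.isChain_nil
  | cons x xs ih =>
    rw [rle]
    rcases h : rle xs with _ | ⟨⟨v, c⟩, t⟩
    · exact List.isChain_singleton _
    · rw [h] at ih
      by_cases hx : x = v
      · simp only [if_pos hx]
        rw [List.isChain_cons] at ih ⊢
        exact ih
      · simp only [if_neg hx]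
        rw [List.isChain_cons]
        refine ⟨?_, ih⟩
        intro y hy
        simp at hy
        rw [← hy]
        simpa using hx

theorem rle_nil_iff (l : List Int) : rle l = [] ↔ l = [] := by
  cases l with
  | nil => simp [rle]
  | cons x xs =>
    simp only [rle]
    rcases h : rle xs with _ | ⟨⟨v, c⟩, t⟩ <;> simp
    by_cases hx : x = v <;> simp [hx]

theorem length_expandS (s : List (Int × Nat)) : (expandS s).length = (s.map (·.2)).sum := by
  induction s with
  | nil => simp [expandS]
  | cons e t ih =>
    rcases e with ⟨v, c⟩
    rw [expandS_cons]; simp [ih]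

theorem count_le_length (l : List Int) : ∀ e ∈ rle l, e.2 ≤ l.length := by
  intro e he
  have h1 := length_expandS (rle l)
  rw [rle_expand] at h1
  have : e.2 ∈ (rle l).map (·.2) := List.mem_map_of_mem he
  have h2 : e.2 ≤ ((rle l).map (·.2)).sum :=
    List.single_le_sum (by intro x _; exact Nat.zero_le x) _ this
  omega

theorem expandS_ne_nil (s : List (Int × Nat)) (hs : s ≠ []) (hp : ∀ e ∈ s, 1 ≤ e.2) :
    expandS s ≠ [] := by
  rcases s with _ | ⟨⟨v, c⟩, t⟩
  · exact absurd rfl hs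
  · rw [expandS_cons]
    have : 1 ≤ c := hp (v, c) (by simp)
    rcases c with _ | c
    · omega
    · simp [List.replicate_succ]

-- ---- split4 facts ----

theorem split4_none (rl : List (Int × Nat)) (h : split4 rl = none) : ∀ e ∈ rl, e.2 < 4 := by
  induction rl with
  | nil => simp
  | cons e t ih =>
    rcases e with ⟨v, c⟩
    rw [split4] at h
    by_cases hc : 4 ≤ c
    · simp [hc] at h
    · rw [if_neg hc] at h
      rcases hsp : split4 t with _ | ⟨⟨q', v', c', t'⟩⟩
      · intro e he
        rcases List.mem_cons.1 he with rfl | ht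
        · omega
        · exact ih hsp _ ht
      · rw [hsp] at h; simp at h

theorem split4_some (rl q : List (Int × Nat)) (v : Int) (c : Nat) (t : List (Int × Nat))
    (h : split4 rl = some (q, v, c, t)) :
    rl = q ++ (v, c) :: t ∧ (∀ e ∈ q, e.2 < 4) ∧ 4 ≤ c := by
  induction rl generalizing q with
  | nil => simp [split4] at h
  | cons e rest ih =>
    rcases e with ⟨v0, c0⟩
    rw [split4] at h
    by_cases hc : 4 ≤ c0
    · rw [if_pos hc, Option.some_inj, Prod.mk.injEq, Prod.mk.injEq, Prod.mk.injEq] at h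
      obtain ⟨rfl, rfl, rfl, rfl⟩ := h
      exact ⟨rfl, by simp, hc⟩
    · rw [if_neg hc] at h
      rcases hsp : split4 rest with _ | ⟨⟨q', v', c', t'⟩⟩
      · rw [hsp] at h; simp at h
      · rw [hsp, Option.some_inj, Prod.mk.injEq, Prod.mk.injEq, Prod.mk.injEq] at h
        obtain ⟨h1, h2, h3, h4⟩ := h
        subst h2; subst h3; subst h4
        obtain ⟨hr, hq, hc4⟩ := ih q' hsp
        subst hr
        refine ⟨by rw [← h1, List.cons_append], ?_, hc4⟩
        intro e he
        rw [← h1] at he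
        rcases List.mem_cons.1 he with rfl | ht
        · omega
        · exact hq _ ht

-- ---- A-side: behaviour of loopA on a run decomposition ----

theorem loop_run (arr : List Int) (start c : Nat) (v : Int) (rest : List Int)
    (hd : arr.drop start = List.replicate c v ++ rest)
    (hrest : ∀ y ∈ rest.head?, y ≠ v) :
    ∀ j, 1 ≤ j → j ≤ c →
    loopA arr (start + j) start j =
      (if rest.isEmpty then Sum.inr (start, c)
       else if 4 ≤ c then Sum.inl (start, c)
       else loopA arr (start + c + 1) (start + c) 1) := by
  have hc1 : c + rest.length = arr.length - start ∧ start ≤ arr.length ∨ c = 0 ∧ rest = [] := by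
    have hl := congrArg List.length hd
    simp [List.length_drop] at hl
    by_cases hs : start ≤ arr.length
    · left; omega
    · right
      have : arr.drop start = [] := by
        apply List.drop_eq_nil_of_le; omega
      rw [this] at hd
      have := hd.symm
      rcases List.append_eq_nil_iff.1 this with ⟨h1, h2⟩
      constructor
      · rcases c with _ | c
        · rfl
        · simp [List.replicate_succ] at h1
      · exact h2
  have hget : ∀ k, arr.getD (start + k) 0 = (List.replicate c v ++ rest).getD k 0 := by
    intro k
    rw [List.getD_eq_getElem?_getD, List.getD_eq_getElem?_getD, ← hd, List.getElem?_drop]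
  have hgv : ∀ k, k < c → arr.getD (start + k) 0 = v := by
    intro k hk
    rw [hget k, List.getD_eq_getElem?_getD, List.getElem?_append_left (by simpa using hk),
      List.getElem?_replicate, if_pos hk]
    rfl
  intro j h1 hj
  have hlen : c + rest.length = arr.length - start ∧ start ≤ arr.length := by
    rcases hc1 with h | ⟨rfl, _⟩
    · exact h
    · omega
  suffices H : ∀ k j, 1 ≤ j → j ≤ c → c - j = k →
      loopA arr (start + j) start j =
        (if rest.isEmpty then Sum.inr (start, c)
         else if 4 ≤ c then Sum.inl (start, c)
         else loopA arr (start + c + 1) (start + c) 1) by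
    exact H (c - j) j h1 hj rfl
  intro k
  induction k with
  | zero =>
    intro j h1 hj hk
    have hjc : j = c := by omega
    subst hjc
    rcases hre : rest with _ | ⟨y, r'⟩
    · -- loop ends: start + c = arr.length
      have hend : ¬ (start + j < arr.length) := by
        rw [hre] at hlen; simp at hlen; omega
      rw [loopA, dif_neg hend]
      simp
    · have hin : start + j < arr.length := by
        rw [hre] at hlen; simp at hlen; omega
      have hy : arr.getD (start + j) 0 = y := by
        rw [hget j, List.getD_eq_getElem?_getD, List.getElem?_append_right (by simp)]
        simp [hre]
      have hv : arr.getD start 0 = v := by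
        have := hgv 0 (by omega); simpa using this
      have hyv : y ≠ v := by
        apply hrest; rw [hre]; rfl
      have hbne : ¬ ((arr.getD start 0 == arr.getD (start + j) 0) = true) := by
        rw [hv, hy]
        simp only [beq_iff_eq]
        exact fun h => hyv h.symm
      rw [loopA, dif_pos hin, if_neg hbne]
      simp only [List.isEmpty_cons, Bool.false_eq_true, if_false]
  | succ k ih =>
    intro j h1 hj hk
    have hjc : j < c := by omega
    have hin : start + j < arr.length := by omega
    have hv : arr.getD start 0 = v := by
      have := hgv 0 (by omega); simpa using this
    have hvj : arr.getD (start + j) 0 = v := hgv j hjc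
    have hbeq : (arr.getD start 0 == arr.getD (start + j) 0) = true := by
      rw [hv, hvj]; exact beq_self_eq_true v
    rw [loopA, dif_pos hin, if_pos hbeq]
    have : start + j + 1 = start + (j + 1) := by omega
    rw [this]
    exact ih (j+1) (by omega) (by omega) (by omega)

-- scan over the whole rle: no run of length ≥ 4 anywhere
theorem scan_none (rl : List (Int × Nat)) :
    ∀ (arr : List Int) (start : Nat),
    (∀ e ∈ rl, 1 ≤ e.2) → (∀ e ∈ rl, e.2 < 4) →
    rl.IsChain (fun a b => a.1 ≠ b.1) →
    arr.drop start = expandS rl → rl ≠ [] →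
    ∃ s' c', loopA arr (start + 1) start 1 = Sum.inr (s', c') ∧ c' < 4 := by
  induction rl with
  | nil => intro _ _ _ _ _ _ h; exact absurd rfl h
  | cons e t ih =>
    intro arr start hpos hlt hch hd _
    rcases e with ⟨v, c⟩
    rw [expandS_cons] at hd
    have hc1 : 1 ≤ c := hpos (v, c) (by simp)
    have hc4 : c < 4 := hlt (v, c) (by simp)
    have hhd : ∀ y ∈ (expandS t).head?, y ≠ v := by
      intro y hy
      rcases t with _ | ⟨⟨v2, c2⟩, t2⟩
      · simp [expandS] at hy
      · rw [expandS_cons] at hy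
        have hc2 : 1 ≤ c2 := hpos (v2, c2) (by simp)
        rcases c2 with _ | c2
        · omega
        · simp [List.replicate_succ] at hy
          rw [← hy]
          have := (List.isChain_cons_cons.1 hch).1
          simpa using this.symm
    have := loop_run arr start c v (expandS t) hd hhd 1 le_rfl hc1
    rcases t with _ | ⟨⟨v2, c2⟩, t2⟩
    · rw [this]
      simp [expandS]
      exact hc4
    · have hne : ¬ (expandS ((v2, c2) :: t2)).isEmpty := by
        have := expandS_ne_nil ((v2, c2) :: t2) (by simp)
          (fun e he => hpos e (List.mem_cons_of_mem _ he))
        simpa [List.isEmpty_iff] using this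
      rw [this, if_neg hne, if_neg (by omega)]
      apply ih arr (start + c)
      · exact fun e he => hpos e (List.mem_cons_of_mem _ he)
      · exact fun e he => hlt e (List.mem_cons_of_mem _ he)
      · exact (List.isChain_cons_cons.1 hch).2
      · rw [← List.drop_drop, hd, List.drop_append_of_le_length (by simp)]
        simp
      · simp

-- scan over the rle: the first run of length ≥ 4 is found, at position (expandS q).length
theorem scan_found (q : List (Int × Nat)) :
    ∀ (arr : List Int) (start : Nat) (v : Int) (c : Nat) (t : List (Int × Nat)),
    (∀ e ∈ q ++ (v, c) :: t, 1 ≤ e.2) → (∀ e ∈ q, e.2 < 4) → 4 ≤ c →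
    (q ++ (v, c) :: t).IsChain (fun a b => a.1 ≠ b.1) →
    arr.drop start = expandS (q ++ (v, c) :: t) →
    loopA arr (start + 1) start 1 =
      (if t.isEmpty then Sum.inr (start + (expandS q).length, c)
       else Sum.inl (start + (expandS q).length, c)) := by
  induction q with
  | nil =>
    intro arr start v c t hpos _ hc4 hch hd
    simp only [List.nil_append] at hpos hch hd
    rw [expandS_cons] at hd
    have hc1 : 1 ≤ c := hpos (v, c) (by simp)
    have hhd : ∀ y ∈ (expandS t).head?, y ≠ v := by
      intro y hy
      rcases t with _ | ⟨⟨v2, c2⟩, t2⟩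
      · simp [expandS] at hy
      · rw [expandS_cons] at hy
        have hc2 : 1 ≤ c2 := hpos (v2, c2) (by simp)
        rcases c2 with _ | c2
        · omega
        · simp [List.replicate_succ] at hy
          rw [← hy]
          have := (List.isChain_cons_cons.1 hch).1
          simpa using this.symm
    have := loop_run arr start c v (expandS t) hd hhd 1 le_rfl hc1
    rcases t with _ | ⟨⟨v2, c2⟩, t2⟩
    · rw [this]; simp [expandS]
    · have hne : ¬ (expandS ((v2, c2) :: t2)).isEmpty := by
        have := expandS_ne_nil ((v2, c2) :: t2) (by simp)
          (fun e he => hpos e (List.mem_cons_of_mem _ he))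
        simpa [List.isEmpty_iff] using this
      rw [this, if_neg hne, if_pos hc4]
      simp [expandS]
  | cons e q' ih =>
    intro arr start v c t hpos hlt hc4 hch hd
    rcases e with ⟨v0, c0⟩
    rw [List.cons_append, expandS_cons] at hd
    have hc01 : 1 ≤ c0 := hpos (v0, c0) (by simp)
    have hc04 : c0 < 4 := hlt (v0, c0) (by simp)
    have hchc : List.IsChain (fun a b => a.1 ≠ b.1) ((v0, c0) :: (q' ++ (v, c) :: t)) := by
      rw [← List.cons_append]; exact hch
    have hch' := List.isChain_cons.1 hchc
    have hhd : ∀ y ∈ (expandS (q' ++ (v, c) :: t)).head? , y ≠ v0 := by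
      intro y hy
      rcases hq : q' ++ (v, c) :: t with _ | ⟨⟨v2, c2⟩, t2⟩
      · simp at hq
      · rw [hq, expandS_cons] at hy
        have hc2 : 1 ≤ c2 := by
          apply hpos (v2, c2)
          rw [List.cons_append, hq]; simp
        rcases c2 with _ | c2
        · omega
        · simp [List.replicate_succ] at hy
          rw [← hy]
          have h2 := hch'.1
          rw [hq] at h2
          have h3 := h2 _ rfl
          simpa using h3.symm
    have := loop_run arr start c0 v0 (expandS (q' ++ (v, c) :: t)) hd hhd 1 le_rfl hc01
    have hne : ¬ (expandS (q' ++ (v, c) :: t)).isEmpty := by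
      have := expandS_ne_nil (q' ++ (v, c) :: t) (by simp)
        (fun e he => hpos e (by rw [List.cons_append]; exact List.mem_cons_of_mem _ he))
      simpa [List.isEmpty_iff] using this
    rw [this, if_neg hne, if_neg (by omega)]
    have hd' : arr.drop (start + c0) = expandS (q' ++ (v, c) :: t) := by
      rw [← List.drop_drop, hd, List.drop_append_of_le_length (by simp)]
      simp
    have := ih arr (start + c0) v c t
      (fun e he => hpos e (by rw [List.cons_append]; exact List.mem_cons_of_mem _ he))
      (fun e he => hlt e (List.mem_cons_of_mem _ he)) hc4 hch'.2 hd'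
    rw [this, expandS_cons]
    simp [Nat.add_assoc]

-- ---- B-side: stack lemmas ----

theorem push_same (v : Int) (k : Nat) (s : List (Int × Nat)) :
    ∀ m, List.foldl push ((v, k) :: s) (List.replicate m v) = (v, k + m) :: s := by
  intro m
  induction m generalizing k with
  | zero => simp
  | succ m ih =>
    rw [List.replicate_succ, List.foldl_cons]
    have : push ((v, k) :: s) v = (v, k + 1) :: s := by simp [push]
    rw [this, ih]
    congr 2
    omega

theorem push_run (c : Nat) (v : Int) (s : List (Int × Nat)) (hc : 1 ≤ c)
    (hs : ∀ e ∈ s.head?, e.1 ≠ v ∧ e.2 < 4) :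
    List.foldl push s (List.replicate c v) = (v, c) :: s := by
  rcases c with _ | c
  · omega
  · rw [List.replicate_succ, List.foldl_cons]
    have h1 : push s v = (v, 1) :: s := by
      rcases s with _ | ⟨⟨v0, c0⟩, t⟩
      · simp [push]
      · obtain ⟨hne, hlt⟩ := hs (v0, c0) rfl
        simp only [push]
        rw [if_neg (by simpa using hne), if_neg (by omega)]
    rw [h1, push_same]
    congr 2
    omega

theorem stack_build (rl : List (Int × Nat)) :
    ∀ s, (∀ e ∈ rl, 1 ≤ e.2 ∧ e.2 < 4) → rl.IsChain (fun a b => a.1 ≠ b.1) →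
    (∀ hd ∈ s.head?, hd.2 < 4 ∧ ∀ f ∈ rl.head?, hd.1 ≠ f.1) →
    List.foldl push s (expandS rl) = rl.reverse ++ s := by
  induction rl with
  | nil => intro s _ _ _; simp [expandS]
  | cons e t ih =>
    intro s hp hch hs
    rcases e with ⟨v, c⟩
    rw [expandS_cons, List.foldl_append]
    have h1 : List.foldl push s (List.replicate c v) = (v, c) :: s := by
      apply push_run c v s (hp (v, c) (by simp)).1
      intro e he
      obtain ⟨h4, hne⟩ := hs e he
      exact ⟨hne (v, c) rfl, h4⟩
    rw [h1]
    have h2 := ih ((v, c) :: s) (fun e he => hp e (List.mem_cons_of_mem _ he))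
      (List.isChain_cons.1 hch).2
      (by
        intro hd hhd
        simp at hhd
        subst hhd
        refine ⟨(hp (v, c) (by simp)).2, ?_⟩
        intro f hf
        rcases t with _ | ⟨f0, t0⟩
        · simp at hf
        · simp at hf
          subst hf
          exact (List.isChain_cons_cons.1 hch).1)
    rw [h2]
    simp

theorem popTop_id (s : List (Int × Nat)) (h : ∀ e ∈ s, e.2 < 4) : popTop s = s := by
  rcases s with _ | ⟨⟨v, c⟩, t⟩
  · rfl
  · simp only [popTop]
    rw [if_neg (by have := h (v, c) (by simp); omega)]

theorem alt_id (rl : List (Int × Nat)) (hp : ∀ e ∈ rl, 1 ≤ e.2 ∧ e.2 < 4)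
    (hch : rl.IsChain (fun a b => a.1 ≠ b.1)) :
    check_alt (expandS rl) = expandS rl := by
  unfold check_alt
  rw [stack_build rl [] hp hch (by simp)]
  simp only [List.append_nil]
  rw [popTop_id _ (by intro e he; exact (hp e (List.mem_reverse.1 he)).2)]
  rw [List.reverse_reverse]

theorem push_skip (v : Int) (c : Nat) (s : List (Int × Nat)) (y : Int)
    (hy : y ≠ v) (hc : 4 ≤ c) (hs : ∀ hd ∈ s.head?, hd.2 < 4) :
    push ((v, c) :: s) y = push s y := by
  rcases s with _ | ⟨⟨v2, c2⟩, t2⟩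
  · simp only [push]
    rw [if_neg (by simpa using hy.symm), if_pos hc]
  · have hlt : c2 < 4 := hs (v2, c2) rfl
    simp only [push]
    rw [if_neg (by simpa using hy.symm), if_pos hc]
    by_cases h2 : v2 = y
    · rw [if_pos (by simpa using h2), if_pos (by simpa using h2)]
    · rw [if_neg (by simpa using h2), if_neg (by simpa using h2), if_neg (by omega)]

-- removing the first run of ≥ 4 does not change B's result
theorem alt_remove (q : List (Int × Nat)) (v : Int) (c : Nat) (t : List (Int × Nat))
    (hq : ∀ e ∈ q, 1 ≤ e.2 ∧ e.2 < 4) (ht : ∀ e ∈ t, 1 ≤ e.2) (hc : 4 ≤ c)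
    (hch : (q ++ (v, c) :: t).IsChain (fun a b => a.1 ≠ b.1)) :
    check_alt (expandS q ++ List.replicate c v ++ expandS t) =
    check_alt (expandS q ++ expandS t) := by
  have hchq : q.IsChain (fun a b => a.1 ≠ b.1) :=
    (List.isChain_append.1 hch).1
  have hjun : ∀ hd ∈ q.reverse.head?, hd.1 ≠ v := by
    intro hd hhd
    rw [List.head?_reverse] at hhd
    have := (List.isChain_append.1 hch).2.2 hd hhd (v, c) rfl
    simpa using this
  have hbase : List.foldl push [] (expandS q) = q.reverse := by
    rw [stack_build q [] hq hchq (by simp)]; simp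
  have hqrev : ∀ hd ∈ q.reverse.head?, hd.2 < 4 := by
    intro hd hhd
    rw [List.head?_reverse] at hhd
    exact (hq hd (List.mem_of_getLast? hhd)).2
  have hmid : List.foldl push [] (expandS q ++ List.replicate c v) = (v, c) :: q.reverse := by
    rw [List.foldl_append, hbase]
    apply push_run c v _ (by omega)
    intro e he
    exact ⟨hjun e he, hqrev e he⟩
  unfold check_alt
  rw [List.foldl_append, hmid, List.foldl_append, hbase]
  rcases t with _ | ⟨⟨v2, c2⟩, t2⟩
  · simp only [expandS, List.flatMap_nil, List.foldl_nil]
    rw [popTop_id q.reverse (by intro e he; exact (hq e (List.mem_reverse.1 he)).2)]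
    simp only [popTop]
    rw [if_pos hc]
  · have hc2 : 1 ≤ c2 := ht (v2, c2) (by simp)
    have hv2 : v2 ≠ v := by
      have := List.isChain_append.1 hch
      have h2 := (List.isChain_cons_cons.1 this.2.1).1
      simpa using h2.symm
    rw [expandS_cons]
    rcases c2 with _ | c2
    · omega
    · rw [List.replicate_succ, List.cons_append, List.foldl_cons, List.foldl_cons]
      rw [push_skip v c q.reverse v2 hv2 hc hqrev]

-- ---- putting it together ----

theorem checkFuel_eq (f : Nat) : ∀ arr : List Int, arr.length < f →
    checkFuel f arr = check_alt arr := by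
  induction f with
  | zero => intro arr h; omega
  | succ f ih =>
    intro arr hlen
    rw [checkFuel]
    by_cases hsmall : arr.length < 4
    · rw [if_pos hsmall]
      have : check_alt (expandS (rle arr)) = expandS (rle arr) := by
        apply alt_id
        · intro e he
          exact ⟨rle_pos arr e he, by have := count_le_length arr e he; omega⟩
        · exact rle_chain arr
      rw [rle_expand] at this
      exact this.symm
    · rw [if_neg hsmall]
      have hne : arr ≠ [] := by
        intro h; rw [h] at hsmall; simp at hsmall
      have hrne : rle arr ≠ [] := by
        rw [Ne, rle_nil_iff]; exact hne
      have hdrop : arr.drop 0 = expandS (rle arr) := by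
        rw [List.drop_zero, rle_expand]
      have hfirst : loopA arr 0 0 0 = loopA arr 1 0 1 := by
        rw [loopA, dif_pos (by omega), if_pos (by simp)]
      rcases hsp : split4 (rle arr) with _ | ⟨⟨q, v, c, t⟩⟩
      · -- no run of ≥ 4: A returns arr, B returns arr
        have hlt := split4_none _ hsp
        obtain ⟨s', c', hres, hc'⟩ := scan_none (rle arr) arr 0 (rle_pos arr) hlt
          (rle_chain arr) hdrop hrne
        rw [hfirst]
        have h01 : loopA arr (0 + 1) 0 1 = loopA arr 1 0 1 := by norm_num
        rw [← h01, hres]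
        simp only []
        rw [if_neg (by omega)]
        have : check_alt (expandS (rle arr)) = expandS (rle arr) := by
          apply alt_id
          · intro e he; exact ⟨rle_pos arr e he, hlt e he⟩
          · exact rle_chain arr
        rw [rle_expand] at this
        exact this.symm
      · -- first run of ≥ 4 found: both remove it
        obtain ⟨hrl, hqlt, hc4⟩ := split4_some _ q v c t hsp
        have hch := rle_chain arr
        have hpos := rle_pos arr
        rw [hrl] at hch hpos hdrop
        have hscan := scan_found q arr 0 v c t hpos hqlt hc4 hch hdrop
        rw [hfirst]
        have h01 : loopA arr (0 + 1) 0 1 = loopA arr 1 0 1 := by norm_num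
        rw [← h01, hscan]
        have harr : arr = expandS q ++ List.replicate c v ++ expandS t := by
          have := hdrop
          rw [List.drop_zero] at this
          rw [this, expandS_append, expandS_cons]
          simp
        have hql : (expandS q).length + c = ((expandS q ++ List.replicate c v).length) := by
          simp
        have hremove : arr.take (expandS q).length ++ arr.drop ((expandS q).length + c) =
            expandS q ++ expandS t := by
          rw [harr, List.append_assoc]
          rw [List.take_append_of_le_length (by simp), List.take_length]
          congr 1
          rw [← List.append_assoc]
          rw [List.drop_append_of_le_length (by simp)]
          simp
        have hlen2 : (expandS q ++ expandS t).length < f := by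
          have h1 : arr.length = (expandS q).length + c + (expandS t).length := by
            rw [harr]
            simp only [List.length_append, List.length_replicate]
          have : (expandS q ++ expandS t).length = (expandS q).length + (expandS t).length := by
            simp
          omega
        have hstep : checkFuel f (expandS q ++ expandS t) = check_alt (expandS q ++ expandS t) :=
          ih _ hlen2
        have halt : check_alt (expandS q ++ expandS t) = check_alt arr := by
          rw [harr]
          exact (alt_remove q v c t
            (fun e he => ⟨hpos e (List.mem_append_left _ he), hqlt e he⟩)
            (fun e he => hpos e (by simp [he])) hc4 hch).symm
        rcases ht : t.isEmpty with _ | _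
        · rw [if_neg (by simp)]
          simp only [Nat.zero_add]
          rw [hremove, hstep, halt]
        · rw [if_pos rfl]
          simp only [Nat.zero_add]
          rw [if_pos hc4, hremove, hstep, halt]

-- ===== VERDICT (by name: the statement is the Claim_ definition above) =====
theorem check_spec : Claim_equal_check := by
  intro arr _
  unfold Spec_check check
  exact checkFuel_eq (arr.length + 1) arr (by omega)
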